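-- pv_equiv track=rewrite | github.com/vltr/very-stupid-simple-routers-bench | uridata.py | full_combinations
-- ===== SOURCE A (Python) =====
-- import itertools
--
-- def full_combinations(data, n=0):
--     if n == 0:
--         n = int(len(data) / 2)
--     for i in range(n):
--         if i == 0:
--             continue
--         for c in itertools.combinations(data, i):
--             yield c
-- ===== SOURCE B (Python) =====
-- def full_combinations(data, n=0):
--     data = tuple(data)
--     if n == 0:
--         n = len(data) // 2
--
--     def rec(start, k):
--         if k == 0:
--             yield ()
--             return
--         for i in range(start, len(data) - k + 1):
--             for rest in rec(i + 1, k - 1):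
--                 yield (data[i],) + rest
--
--     for size in range(1, n):
--         yield from rec(0, size)
-- ===== Notes on version B (the rewrite author's own statement) =====
-- stated objective: alternative
-- what changed: Replaces the per-size itertools.combinations call (and the range(n) loop that skips i==0) with a hand-written recursive index-based combination generator iterated for sizes 1..n-1.
import Mathlib
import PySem

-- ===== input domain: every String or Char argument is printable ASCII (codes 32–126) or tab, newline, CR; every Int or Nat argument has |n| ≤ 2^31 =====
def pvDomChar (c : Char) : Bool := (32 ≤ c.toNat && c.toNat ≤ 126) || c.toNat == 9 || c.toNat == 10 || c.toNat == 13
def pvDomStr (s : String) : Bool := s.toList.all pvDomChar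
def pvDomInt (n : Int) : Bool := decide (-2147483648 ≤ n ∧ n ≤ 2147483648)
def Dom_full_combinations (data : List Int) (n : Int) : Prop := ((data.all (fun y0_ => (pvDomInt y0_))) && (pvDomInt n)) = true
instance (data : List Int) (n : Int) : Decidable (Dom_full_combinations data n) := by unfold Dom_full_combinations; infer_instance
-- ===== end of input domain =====

-- B replaces the per-size itertools.combinations call with the classic pruned recursive
-- index-based combination builder, iterated for sizes 1..n-1.

-- ===== PORT A =====
-- itertools.combinations(data, k): k-tuples in index-lexicographic order
def combA : Nat → List Int → List (List Int)
  | 0, _ => [[]]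
  | _+1, [] => []
  | k+1, x :: xs => (combA k xs).map (fun t => x :: t) ++ combA (k+1) xs

def full_combinations (data : List Int) (n : Int) : List (List Int) :=
  -- n = int(len(data)/2): len(data) ≥ 0, so this is floor division by 2
  let n1 : Int := if n = 0 then ((data.length : Int) / 2) else n
  (PySem.List.pyRange 0 n1 1).foldl
    (fun acc i => if i = 0 then acc else acc ++ combA i.toNat data) []

-- ===== PORT B =====
-- rec(start, k): for i in range(start, len(data) - k + 1): data[i] consed onto rec(i+1, k-1)
def combsFrom (data : List Int) : Nat → Nat → List (List Int)
  | 0, _ => [[]]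
  | k+1, start =>
      (List.range' start (((data.length : Int) - (k+1) + 1 - start).toNat)).flatMap
        (fun i => (combsFrom data k (i+1)).map (fun t => data.getD i 0 :: t))

def full_combinations_alt (data : List Int) (n : Int) : List (List Int) :=
  let n1 : Int := if n = 0 then ((data.length : Int) / 2) else n
  (PySem.List.pyRange 1 n1 1).flatMap (fun k => combsFrom data k.toNat 0)

-- ===== PRECONDITION & SPEC =====
def Spec_full_combinations (data : List Int) (n : Int) (out : List (List Int)) : Prop := out = full_combinations_alt data n
instance (data : List Int) (n : Int) (out : List (List Int)) : Decidable (Spec_full_combinations data n out) := by unfold Spec_full_combinations; infer_instance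

-- ===== CLAIM (what is proved, stated in full; the proofs are below) =====
def Claim_equal_full_combinations : Prop := ∀ (data : List Int) (n : Int), Dom_full_combinations data n → Spec_full_combinations data n (full_combinations data n)

-- ===== LEMMAS AND PROOFS =====

-- combinations of a size larger than the list are none
lemma combA_nil : ∀ (l : List Int) (k : Nat), l.length < k → combA k l = [] := by
  intro l
  induction l with
  | nil =>
      intro k hk
      cases k with
      | zero => omega
      | succ j => rfl
  | cons x xs ih =>
      intro k hk
      cases k with
      | zero => omega
      | succ j =>
          rw [combA, ih j (by simp at hk; omega), ih (j+1) (by simp at hk; omega)]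
          simp

lemma combsFrom_eq (data : List Int) :
    ∀ (m k start : Nat), m = data.length - start →
      combsFrom data k start = combA k (data.drop start) := by
  intro m
  induction m with
  | zero =>
      intro k start h
      have hle : data.length ≤ start := by omega
      rw [List.drop_eq_nil_of_le hle]
      cases k with
      | zero => simp [combsFrom, combA]
      | succ j =>
          have hc : (((data.length : Int) - (j+1) + 1 - start).toNat) = 0 := by omega
          rw [combsFrom, hc]
          simp [combA]
  | succ m ih =>
      intro k start h
      have hlt : start < data.length := by omega
      cases k with
      | zero => simp [combsFrom, combA]
      | succ j =>
          have hdrop : data.drop start = data[start] :: data.drop (start + 1) :=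
            (List.getElem_cons_drop hlt).symm
          have hm' : m = data.length - (start + 1) := by omega
          by_cases hbig : m < j
          · -- pruned: fewer than j+1 elements remain from start
            have hc : (((data.length : Int) - (j+1) + 1 - start).toNat) = 0 := by omega
            rw [combsFrom, hc]
            have : (data.drop start).length < j + 1 := by
              rw [List.length_drop]; omega
            rw [combA_nil _ _ this]
            rfl
          · have hc : (((data.length : Int) - (j+1) + 1 - start).toNat) = (m - j) + 1 := by
              omega
            have hc' : (((data.length : Int) - (j+1) + 1 - ((start+1 : Nat) : Int)).toNat) = m - j := by
              push_cast; omega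
            have htail : (List.range' (start+1) (m - j)).flatMap
                (fun i => (combsFrom data j (i+1)).map (fun t => data.getD i 0 :: t))
                = combsFrom data (j+1) (start + 1) := by
              rw [combsFrom, hc']
            rw [combsFrom, hc, List.range'_succ, List.flatMap_cons, htail,
              ih j (start + 1) hm', ih (j+1) (start + 1) hm', hdrop, combA]
            simp only [List.getD_eq_getElem data 0 hlt]

lemma outer_eq (data : List Int) (n1 : Int) :
    (PySem.List.pyRange 0 n1 1).foldl
      (fun acc i => if i = 0 then acc else acc ++ combA i.toNat data) []
    = (PySem.List.pyRange 1 n1 1).flatMap (fun k => combsFrom data k.toNat 0) := by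
  by_cases hpos : 0 < n1
  · rw [PySem.List.pyRange_one_cons hpos]
    simp only [List.foldl_cons, reduceIte, zero_add]
    rw [PySem.List.foldl_congr_mem _ _
        (fun acc (i : Int) => acc ++ combA i.toNat data) _
        (by
          intro acc x hx
          have : 1 ≤ x := (PySem.List.mem_pyRange_one.mp hx).1
          have hne : x ≠ 0 := by omega
          simp [hne]),
      PySem.List.foldl_append_eq_flatMap]
    simp only [List.nil_append]
    apply List.flatMap_congr
    intro k hk
    rw [combsFrom_eq data data.length k.toNat 0 (by omega)]
    simp
  · rw [PySem.List.pyRange_one_eq_nil (by omega), PySem.List.pyRange_one_eq_nil (by omega)]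
    rfl

-- ===== VERDICT (by name: the statement is the Claim_ definition above) =====
theorem full_combinations_spec : Claim_equal_full_combinations := by
  intro data n _
  unfold Spec_full_combinations full_combinations full_combinations_alt
  exact outer_eq data _
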